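-- pv_equiv track=rewrite | github.com/InitialS-AI/Stateful-AI-Analysis | sequential_mining_yelp_nosep_unique_single.py | find_similar_pattern
-- ===== SOURCE A (Python) =====
-- def find_similar_pattern(target_trace, querry_trace, max_gap):
--     """
--     find similar pattern in a trace
--     :param target_trace: [1, 2, 3, 4, 5, 6, ...]
--     :param querry_trace: [2, 3, 4]
--     :return:
--     """
--     # TODO
--     querry_trace_len = len(querry_trace)
--     this_trace_len = len(target_trace)
--     if this_trace_len < querry_trace_len:
--         return False
--     if querry_trace[0] in target_trace:
--         i = target_trace.index(querry_trace[0])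
--     else:
--         return False
--     while i < (this_trace_len - querry_trace_len + 1):
--         while i < (this_trace_len - querry_trace_len + 1) and target_trace[i] != querry_trace[0]:
--             i += 1
--         j = 0
--         k = 0
--         id = []
--         gap = 0
--         while (i + j) < this_trace_len and gap <= max_gap:
--             if target_trace[i + j] == querry_trace[k]:
--                 id.append(i + j)
--                 k += 1
--                 gap = -1
--             j += 1
--             gap += 1
--             if k == querry_trace_len:
--                 return True
--         i += 1
--     return False
-- ===== SOURCE B (Python) =====
-- def find_similar_pattern(target_trace, querry_trace, max_gap):
--     """Scan the occurrences of the first query symbol; from each, match the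
--     remaining query symbols greedily, each inside the window of the next
--     max_gap+1 positions."""
--     n = len(target_trace)
--     m = len(querry_trace)
--     first = querry_trace[0]
--     rest = querry_trace[1:]
--     for p in range(0, n - m + 1):
--         if target_trace[p] != first:
--             continue
--         pos = p
--         ok = True
--         for sym in rest:
--             window = target_trace[pos + 1 : pos + 1 + max(0, max_gap + 1)]
--             if sym in window:
--                 pos = pos + 1 + window.index(sym)
--             else:
--                 ok = False
--                 break
--         if ok:
--             return True
--     return False
-- ===== Notes on version B (the rewrite author's own statement) =====
-- stated objective: simpler
-- what changed: A's three nested while-loops with i/j/k/gap counters and a dead id list are replaced by a scan over the occurrences of the first query symbol that matches each remaining query symbol via a slice-window lookup (find next occurrence within max_gap+1 positions).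
-- intended difference: On a one-element query whose symbol occurs in the target with max_gap < 0, A returns False because its gap counter blocks the loop before any comparison, while B returns True, the intended value since a one-element pattern involves no gaps at all. — e.g. on find_similar_pattern([1], [1], -1): A returns false, B returns true
import Mathlib
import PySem

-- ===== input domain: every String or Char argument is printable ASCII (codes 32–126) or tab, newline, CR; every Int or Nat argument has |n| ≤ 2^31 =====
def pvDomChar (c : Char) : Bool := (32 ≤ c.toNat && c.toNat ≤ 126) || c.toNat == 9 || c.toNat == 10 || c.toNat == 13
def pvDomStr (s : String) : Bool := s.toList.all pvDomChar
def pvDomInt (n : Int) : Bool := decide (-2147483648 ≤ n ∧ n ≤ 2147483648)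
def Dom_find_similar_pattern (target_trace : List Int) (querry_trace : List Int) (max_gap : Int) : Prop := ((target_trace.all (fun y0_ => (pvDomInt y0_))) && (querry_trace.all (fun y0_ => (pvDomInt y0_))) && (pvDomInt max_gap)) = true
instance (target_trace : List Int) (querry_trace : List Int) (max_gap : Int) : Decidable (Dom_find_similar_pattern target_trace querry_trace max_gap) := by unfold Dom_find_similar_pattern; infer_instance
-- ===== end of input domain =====

-- B replaces A's three fused while-loops (counters i/j/k/gap and a dead id list) by a scan over the
-- occurrences of the first query symbol with a per-symbol window lookup; equivalence is proved outside
-- D_ (one-element query, negative max_gap, symbol present in the target), where B's True is intended.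

-- ===== PORT A =====
-- inner advance loop: 'while i < (n - m + 1) and target_trace[i] != querry_trace[0]: i += 1'
def pyAdvance (t : List Int) (q0 bound i : Int) : Int :=
  if _ : i < bound ∧ (PySem.List.pyGet? t i).getD 0 ≠ q0 then
    pyAdvance t q0 bound (i + 1)
  else i
termination_by (bound - i).toNat
decreasing_by omega

-- cited by pyOuter's decreasing_by (the loop variable never moves backwards)
theorem le_pyAdvance (t : List Int) (q0 bound i : Int) : i ≤ pyAdvance t q0 bound i := by
  fun_induction pyAdvance with
  | case1 i h ih => omega
  | case2 i h => omega

-- greedy matching loop 'while (i + j) < this_trace_len and gap <= max_gap: …' (id is A's dead list)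
def pyGreedy (t q : List Int) (n m mg i j k : Int) (id : List Int) (gap : Int) : Bool :=
  if _ : i + j < n ∧ gap ≤ mg then
    if (PySem.List.pyGet? t (i + j)).getD 0 = (PySem.List.pyGet? q k).getD 0 then
      if k + 1 = m then true
      else pyGreedy t q n m mg i (j + 1) (k + 1) (id ++ [i + j]) 0
    else
      if k = m then true
      else pyGreedy t q n m mg i (j + 1) k id (gap + 1)
  else false
termination_by (n - (i + j)).toNat
decreasing_by all_goals omega

-- outer loop: advance to the next occurrence of q0, run the greedy match, i += 1
def pyOuter (t q : List Int) (q0 n m mg bound i : Int) : Bool :=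
  if _ : i < bound then
    if pyGreedy t q n m mg (pyAdvance t q0 bound i) 0 0 [] 0 then true
    else pyOuter t q q0 n m mg bound (pyAdvance t q0 bound i + 1)
  else false
termination_by (bound - i).toNat
decreasing_by have := le_pyAdvance t q0 bound i; omega

def find_similar_pattern (target_trace : List Int) (querry_trace : List Int) (max_gap : Int) : Bool :=
  let m : Int := querry_trace.length
  let n : Int := target_trace.length
  if n < m then false
  else
    let q0 := (PySem.List.pyGet? querry_trace 0).getD 0
    if target_trace.contains q0 then
      let i : Int := ((PySem.List.index? target_trace q0).getD 0 : Nat)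
      pyOuter target_trace querry_trace q0 n m max_gap (n - m + 1) i
    else false

-- ===== PORT B =====
-- 'for sym in rest: window = target_trace[pos+1 : pos+1+max(0, max_gap+1)]; …'
def altMatch (t : List Int) (syms : List Int) (mg : Int) (pos : Int) : Bool :=
  match syms with
  | [] => true
  | sym :: rest =>
    let window := PySem.List.slice t (some (pos + 1)) (some (pos + 1 + max 0 (mg + 1)))
    match PySem.List.index? window sym with
    | some idx => altMatch t rest mg (pos + 1 + (idx : Int))
    | none => false

-- a cons step for slices with integer bounds

def find_similar_pattern_alt (target_trace : List Int) (querry_trace : List Int) (max_gap : Int) : Bool :=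
  let n : Int := target_trace.length
  let m : Int := querry_trace.length
  let first := (PySem.List.pyGet? querry_trace 0).getD 0
  let rest := PySem.List.slice querry_trace (some 1) none
  (PySem.List.pyRange 0 (n - m + 1) 1).any fun p =>
    ((PySem.List.pyGet? target_trace p).getD 0 == first) && altMatch target_trace rest max_gap p

-- ===== PRECONDITION & SPEC =====
-- Pre_ excludes only the empty query, on which A raises IndexError at querry_trace[0] (B raises there too).
def Pre_find_similar_pattern (target_trace : List Int) (querry_trace : List Int) (max_gap : Int) : Prop :=
  querry_trace ≠ []
instance (target_trace : List Int) (querry_trace : List Int) (max_gap : Int) : Decidable (Pre_find_similar_pattern target_trace querry_trace max_gap) := by unfold Pre_find_similar_pattern; infer_instance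

def pvWitness_find_similar_pattern : List Int × List Int × Int := ([1, 2, 3], [2, 3], 0)

-- On a one-element query whose symbol occurs in the target with max_gap < 0, A returns False (its gap
-- counter blocks the matching loop before any comparison) while B returns True — the intended value,
-- since a one-element pattern involves no gaps at all.
def D_find_similar_pattern (target_trace : List Int) (querry_trace : List Int) (max_gap : Int) : Prop :=
  max_gap < 0 ∧ querry_trace.length = 1 ∧ ∀ x ∈ querry_trace, x ∈ target_trace
instance (target_trace : List Int) (querry_trace : List Int) (max_gap : Int) : Decidable (D_find_similar_pattern target_trace querry_trace max_gap) := by unfold D_find_similar_pattern; infer_instance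

def Spec_find_similar_pattern (target_trace : List Int) (querry_trace : List Int) (max_gap : Int) (out : Bool) : Prop := ¬ D_find_similar_pattern target_trace querry_trace max_gap → out = find_similar_pattern_alt target_trace querry_trace max_gap
instance (target_trace : List Int) (querry_trace : List Int) (max_gap : Int) (out : Bool) : Decidable (Spec_find_similar_pattern target_trace querry_trace max_gap out) := by unfold Spec_find_similar_pattern; infer_instance

def pvDiffWitness_find_similar_pattern : List Int × List Int × Int := ([1], [1], -1)
def pvDiffWitnessOut_find_similar_pattern : Bool × Bool := (false, true)

-- ===== CLAIM (what is proved, stated in full; the proofs are below) =====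
def Claim_unchanged_find_similar_pattern : Prop := ∀ (target_trace : List Int) (querry_trace : List Int) (max_gap : Int), Dom_find_similar_pattern target_trace querry_trace max_gap → Pre_find_similar_pattern target_trace querry_trace max_gap → Spec_find_similar_pattern target_trace querry_trace max_gap (find_similar_pattern target_trace querry_trace max_gap)
def Claim_changed_find_similar_pattern : Prop := Dom_find_similar_pattern (pvDiffWitness_find_similar_pattern.1) (pvDiffWitness_find_similar_pattern.2.1) (pvDiffWitness_find_similar_pattern.2.2) ∧ Pre_find_similar_pattern (pvDiffWitness_find_similar_pattern.1) (pvDiffWitness_find_similar_pattern.2.1) (pvDiffWitness_find_similar_pattern.2.2) ∧ D_find_similar_pattern (pvDiffWitness_find_similar_pattern.1) (pvDiffWitness_find_similar_pattern.2.1) (pvDiffWitness_find_similar_pattern.2.2) ∧ find_similar_pattern (pvDiffWitness_find_similar_pattern.1) (pvDiffWitness_find_similar_pattern.2.1) (pvDiffWitness_find_similar_pattern.2.2) = pvDiffWitnessOut_find_similar_pattern.1 ∧ find_similar_pattern_alt (pvDiffWitness_find_similar_pattern.1) (pvDiffWitness_find_similar_pattern.2.1) (pvDiffWitness_find_similar_pattern.2.2)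 = pvDiffWitnessOut_find_similar_pattern.2 ∧ pvDiffWitnessOut_find_similar_pattern.1 ≠ pvDiffWitnessOut_find_similar_pattern.2
def Claim_exact_find_similar_pattern : Prop := ∀ (target_trace : List Int) (querry_trace : List Int) (max_gap : Int), Dom_find_similar_pattern target_trace querry_trace max_gap → Pre_find_similar_pattern target_trace querry_trace max_gap → D_find_similar_pattern target_trace querry_trace max_gap → find_similar_pattern target_trace querry_trace max_gap ≠ find_similar_pattern_alt target_trace querry_trace max_gap

-- ===== LEMMAS AND PROOFS =====
theorem slice_cons_step (t : List Int) (a b : Int) (ha : 0 ≤ a) (hab : a < b)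
    (hlen : a < (t.length : Int)) :
    PySem.List.slice t (some a) (some b) =
      t[a.toNat]'(by omega) :: PySem.List.slice t (some (a + 1)) (some b) := by
  rw [PySem.List.slice_toNat t ha (by omega), PySem.List.slice_toNat t (by omega) (by omega)]
  have h1 : t.drop a.toNat = t[a.toNat]'(by omega) :: t.drop (a.toNat + 1) :=
    List.drop_eq_getElem_cons (by omega)
  have h3 : (a + 1).toNat = a.toNat + 1 := by omega
  have h2 : b.toNat - a.toNat = (b.toNat - (a + 1).toNat) + 1 := by omega
  rw [h1, h2, List.take_succ_cons, h3]

theorem slice_empty_of_le (t : List Int) (a b : Int) (ha : 0 ≤ a) (hb : 0 ≤ b) (hba : b ≤ a) :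
    PySem.List.slice t (some a) (some b) = [] := by
  rw [PySem.List.slice_toNat t ha hb]
  have : b.toNat - a.toNat = 0 := by omega
  simp [this]

theorem slice_empty_of_len_le (t : List Int) (a b : Int) (hb : 0 ≤ b) (ha : (t.length : Int) ≤ a) :
    PySem.List.slice t (some a) (some b) = [] := by
  rw [PySem.List.slice_toNat t (by omega) hb]
  simp [List.drop_eq_nil_of_le (by omega : t.length ≤ a.toNat)]

theorem altMatch_unfold (t q : List Int) (mg : Int) (k : Nat) (hk : k < q.length) (pos : Int) :
    altMatch t (q.drop k) mg pos =
      (match PySem.List.index?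
          (PySem.List.slice t (some (pos + 1)) (some (max (pos + 1) (pos + 1 + (mg + 1))))) q[k] with
       | some d => altMatch t (q.drop (k + 1)) mg (pos + 1 + (d : Int))
       | none => false) := by
  have hdrop : q.drop k = q[k] :: q.drop (k + 1) := List.drop_eq_getElem_cons hk
  have hmax : max (pos + 1) (pos + 1 + (mg + 1)) = pos + 1 + max 0 (mg + 1) := by omega
  rw [hdrop, hmax]
  rfl

theorem pyGreedy_eq_scan (t q : List Int) (mg j i g : Int) (k : Nat) (id : List Int)
    (hk1 : 1 ≤ k) (hkm : k < q.length) (hcur : 0 ≤ i + j) (hg : 0 ≤ g) :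
    pyGreedy t q t.length q.length mg i j (k : Int) id g =
      (match PySem.List.index?
          (PySem.List.slice t (some (i + j)) (some (max (i + j) (i + j + (mg - g) + 1)))) q[k] with
       | some d => altMatch t (q.drop (k + 1)) mg (i + j + (d : Int))
       | none => false) := by
  rw [pyGreedy]
  split
  · next hc =>
    obtain ⟨hlt, hgm⟩ := hc
    have hcurn : (i + j).toNat < t.length := by omega
    have hmax : max (i + j) (i + j + (mg - g) + 1) = i + j + (mg - g) + 1 := by omega
    have hmax2 : max (i + j + 1) (i + j + 1 + (mg - (g + 1)) + 1) = i + j + (mg - g) + 1 := by omega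
    have hwin : PySem.List.slice t (some (i + j)) (some (max (i + j) (i + j + (mg - g) + 1))) =
        t[(i + j).toNat] ::
          PySem.List.slice t (some (i + j + 1)) (some (max (i + j + 1) (i + j + 1 + (mg - (g + 1)) + 1))) := by
      rw [hmax, hmax2]
      exact slice_cons_step t (i + j) (i + j + (mg - g) + 1) hcur (by omega) (by omega)
    have hgt : (PySem.List.pyGet? t (i + j)).getD 0 = t[(i + j).toNat] := by
      rw [PySem.List.pyGet?_of_nonneg t hcur]
      simp [List.getElem?_eq_getElem hcurn]
    have hgq : (PySem.List.pyGet? q (k : Int)).getD 0 = q[k] := by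
      simp [PySem.List.pyGet?_natCast, List.getElem?_eq_getElem hkm]
    rw [hwin, hgt, hgq]
    by_cases heq : t[(i + j).toNat] = q[k]
    · rw [if_pos heq, heq, PySem.List.index?_cons_self]
      by_cases hklen : (k : Int) + 1 = (q.length : Int)
      · rw [if_pos hklen]
        have : q.drop (k + 1) = [] := by
          have : q.length ≤ k + 1 := by omega
          simp [List.drop_eq_nil_of_le this]
        simp [this, altMatch]
      · rw [if_neg hklen]
        have hkm' : k + 1 < q.length := by omega
        have hcast : (k : Int) + 1 = ((k + 1 : Nat) : Int) := by push_cast; ring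
        rw [hcast]
        rw [pyGreedy_eq_scan t q mg (j + 1) i 0 (k + 1) _ (by omega) hkm' (by omega) le_rfl]
        have e1 : i + (j + 1) + (mg - 0) + 1 = i + j + 1 + (mg + 1) := by ring
        have e2 : i + (j + 1) = i + j + 1 := by ring
        rw [e1, e2, ← altMatch_unfold t q mg (k + 1) hkm' (i + j)]
        simp
    · rw [if_neg heq, PySem.List.index?_cons_of_ne _ (fun h => heq h)]
      have hkne : ¬ ((k : Int) = (q.length : Int)) := by omega
      rw [if_neg hkne]
      rw [pyGreedy_eq_scan t q mg (j + 1) i (g + 1) k id hk1 hkm (by omega) (by omega)]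
      have harg : i + (j + 1) = i + j + 1 := by ring
      simp only [harg]
      cases hidx : PySem.List.index?
          (PySem.List.slice t (some (i + j + 1)) (some (max (i + j + 1) (i + j + 1 + (mg - (g + 1)) + 1)))) q[k] with
      | none => simp
      | some d =>
        simp only [Option.map_some]
        have : i + j + ((d : Int) + 1) = i + j + 1 + (d : Int) := by ring
        push_cast
        rw [this]
  · next hc =>
    push_neg at hc
    by_cases hlt : i + j < (t.length : Int)
    · have hgm : mg < g := by have := hc hlt; omega
      have : max (i + j) (i + j + (mg - g) + 1) = i + j := by omega
      rw [this, slice_empty_of_le t _ _ hcur hcur le_rfl]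
      simp [PySem.List.index?]
    · rw [slice_empty_of_len_le t _ _ (by omega) (by omega)]
      simp [PySem.List.index?]
termination_by (t.length - (i + j)).toNat
decreasing_by all_goals omega

theorem pyGreedy_start (t q : List Int) (mg p : Int) (hp : 0 ≤ p) (hm : 1 ≤ q.length)
    (hpn : p + q.length ≤ (t.length : Int))
    (ht : (PySem.List.pyGet? t p).getD 0 = (PySem.List.pyGet? q 0).getD 0)
    (hD : ¬(q.length = 1 ∧ mg < 0)) :
    pyGreedy t q t.length q.length mg p 0 0 [] 0 = altMatch t (q.drop 1) mg p := by
  rw [pyGreedy]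
  have hpn' : p + 0 < (t.length : Int) := by omega
  by_cases hmg : 0 ≤ mg
  · rw [dif_pos ⟨hpn', hmg⟩]
    have hp0 : p + 0 = p := by ring
    rw [hp0, ht, if_pos rfl]
    by_cases h1 : (0 : Int) + 1 = (q.length : Int)
    · rw [if_pos h1]
      have : q.drop 1 = [] := by
        have : q.length ≤ 1 := by omega
        simp [List.drop_eq_nil_of_le this]
      simp [this, altMatch]
    · rw [if_neg h1]
      have hkm' : 1 < q.length := by omega
      have hc1 : (0 : Int) + 1 = ((1 : Nat) : Int) := by norm_num
      rw [hc1, pyGreedy_eq_scan t q mg ((1 : Nat) : Int) p 0 1 _ le_rfl hkm' (by push_cast; omega) le_rfl]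
      have e1 : p + ((1 : Nat) : Int) + (mg - 0) + 1 = p + 1 + (mg + 1) := by push_cast; ring
      have e2 : p + ((1 : Nat) : Int) = p + 1 := by push_cast; ring
      rw [e1, e2, ← altMatch_unfold t q mg 1 hkm' p]
  · rw [dif_neg (by intro h; exact hmg h.2)]
    have hlen2 : 2 ≤ q.length := by
      rcases Nat.lt_or_ge q.length 2 with h | h
      · exact absurd ⟨by omega, by omega⟩ hD
      · exact h
    have hdrop : q.drop 1 = q[1] :: q.drop 2 := List.drop_eq_getElem_cons (by omega)
    have hmax0 : max 0 (mg + 1) = 0 := by omega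
    have hwin : PySem.List.slice t (some (p + 1)) (some (p + 1 + max 0 (mg + 1))) = ([] : List Int) := by
      rw [hmax0]
      exact slice_empty_of_le t _ _ (by omega) (by omega) (by omega)
    rw [hdrop]
    simp [altMatch, hwin, PySem.List.index?]

theorem pyAdvance_le_bound (t : List Int) (q0 bound i : Int) (h : i ≤ bound) :
    pyAdvance t q0 bound i ≤ bound := by
  rw [pyAdvance]
  split
  · next hc => exact pyAdvance_le_bound t q0 bound (i+1) (by omega)
  · exact h
termination_by (bound - i).toNat
decreasing_by omega

theorem pyAdvance_skips (t : List Int) (q0 bound i p : Int) (hip : i ≤ p)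
    (hlt : p < pyAdvance t q0 bound i) : (PySem.List.pyGet? t p).getD 0 ≠ q0 := by
  rw [pyAdvance] at hlt
  split at hlt
  · next hc =>
    by_cases hp : p = i
    · subst hp; exact hc.2
    · exact pyAdvance_skips t q0 bound (i+1) p (by omega) hlt
  · omega
termination_by (bound - i).toNat
decreasing_by omega

theorem pyAdvance_hit (t : List Int) (q0 bound i : Int)
    (h : pyAdvance t q0 bound i < bound) :
    (PySem.List.pyGet? t (pyAdvance t q0 bound i)).getD 0 = q0 := by
  by_cases hc : i < bound ∧ (PySem.List.pyGet? t i).getD 0 ≠ q0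
  · rw [pyAdvance, dif_pos hc] at h ⊢
    exact pyAdvance_hit t q0 bound (i+1) h
  · rw [pyAdvance, dif_neg hc] at h ⊢
    push_neg at hc
    exact hc h
termination_by (bound - i).toNat
decreasing_by omega

theorem pyGreedy_false_of_short (t q : List Int) (n m mg i j k : Int) (id : List Int) (gap : Int)
    (h : k + (n - (i + j)) < m) : pyGreedy t q n m mg i j k id gap = false := by
  rw [pyGreedy]
  split
  · next hc =>
    split
    · split
      · omega
      · exact pyGreedy_false_of_short t q n m mg i (j+1) (k+1) _ 0 (by omega)
    · split
      · omega
      · exact pyGreedy_false_of_short t q n m mg i (j+1) k id (gap+1) (by omega)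
  · rfl
termination_by (n - (i + j)).toNat
decreasing_by all_goals omega

theorem pyOuter_false_of_neg (t q : List Int) (q0 n m mg bound : Int) (hmg : mg < 0)
    (i : Int) : pyOuter t q q0 n m mg bound i = false := by
  rw [pyOuter]
  split
  · next hc =>
    have hg : pyGreedy t q n m mg (pyAdvance t q0 bound i) 0 0 [] 0 = false := by
      rw [pyGreedy, dif_neg (by intro h; omega)]
    rw [if_neg (by simp [hg])]
    exact pyOuter_false_of_neg t q q0 n m mg bound hmg _
  · rfl
termination_by (bound - i).toNat
decreasing_by have := le_pyAdvance t q0 bound i; omega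

theorem pyOuter_eq_any (t q : List Int) (q0 mg : Int)
    (hq0 : q0 = (PySem.List.pyGet? q 0).getD 0) (hm : 1 ≤ q.length)
    (hD : ¬(q.length = 1 ∧ mg < 0)) (i : Int) (hi : 0 ≤ i) :
    pyOuter t q q0 t.length q.length mg ((t.length : Int) - q.length + 1) i =
      (PySem.List.pyRange i ((t.length : Int) - q.length + 1) 1).any (fun p =>
        ((PySem.List.pyGet? t p).getD 0 == q0) && altMatch t (q.drop 1) mg p) := by
  set bound : Int := (t.length : Int) - q.length + 1 with hbound
  rw [pyOuter]
  split
  · next hilt =>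
    have h1 : i ≤ pyAdvance t q0 bound i := le_pyAdvance t q0 bound i
    have h2 : pyAdvance t q0 bound i ≤ bound := pyAdvance_le_bound t q0 bound i (by omega)
    rw [PySem.List.pyRange_one_append i (pyAdvance t q0 bound i) bound h1 h2, List.any_append]
    have hfirst : (PySem.List.pyRange i (pyAdvance t q0 bound i) 1).any (fun p =>
        ((PySem.List.pyGet? t p).getD 0 == q0) && altMatch t (q.drop 1) mg p) = false := by
      rw [List.any_eq_false]
      intro p hmem
      have hpb := (PySem.List.mem_pyRange_one).mp hmem
      have := pyAdvance_skips t q0 bound i p hpb.1 hpb.2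
      simp [this]
    rw [hfirst, Bool.false_or]
    by_cases hib : pyAdvance t q0 bound i < bound
    · have hq0' : (PySem.List.pyGet? t (pyAdvance t q0 bound i)).getD 0 = q0 :=
        pyAdvance_hit t q0 bound i hib
      have hgreedy : pyGreedy t q t.length q.length mg (pyAdvance t q0 bound i) 0 0 [] 0 =
          altMatch t (q.drop 1) mg (pyAdvance t q0 bound i) := by
        apply pyGreedy_start t q mg _ (by omega) hm (by omega) _ hD
        rw [hq0', hq0]
      rw [PySem.List.pyRange_one_cons hib, List.any_cons]
      rw [hgreedy]
      cases ha : altMatch t (q.drop 1) mg (pyAdvance t q0 bound i) with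
      | true => simp [ha, hq0']
      | false =>
        rw [if_neg (by simp [ha])]
        rw [pyOuter_eq_any t q q0 mg hq0 hm hD (pyAdvance t q0 bound i + 1) (by omega)]
        simp only [ha, Bool.and_false, Bool.false_or]
        rw [← hbound]
    · have hieq : pyAdvance t q0 bound i = bound := by omega
      have hgf' : pyGreedy t q t.length q.length mg (pyAdvance t q0 bound i) 0 0 [] 0 = false := by
        rw [hieq]
        exact pyGreedy_false_of_short t q _ _ mg bound 0 0 [] 0 (by omega)
      rw [if_neg (by simp [hgf'])]
      rw [pyOuter_eq_any t q q0 mg hq0 hm hD (pyAdvance t q0 bound i + 1) (by omega)]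
      rw [hieq]
      rw [PySem.List.pyRange_one_eq_nil (by omega), PySem.List.pyRange_one_eq_nil (by omega)]
  · next h =>
    rw [PySem.List.pyRange_one_eq_nil (by omega)]
    rfl
termination_by ((t.length : Int) - q.length + 1 - i).toNat
decreasing_by all_goals (have := le_pyAdvance t q0 ((t.length : Int) - q.length + 1) i; omega)

theorem main_equiv (t q : List Int) (mg : Int) (hpre : q ≠ [])
    (hnD : ¬ (mg < 0 ∧ q.length = 1 ∧ ∀ x ∈ q, x ∈ t)) :
    find_similar_pattern t q mg = find_similar_pattern_alt t q mg := by
  have hm : 1 ≤ q.length := List.length_pos_iff.mpr hpre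
  simp only [find_similar_pattern, find_similar_pattern_alt]
  rw [PySem.List.slice_from q (by norm_num)]
  simp only [Int.toNat_one]
  set q0 := (PySem.List.pyGet? q 0).getD 0 with hq0def
  by_cases hnm : (t.length : Int) < (q.length : Int)
  · rw [if_pos hnm, PySem.List.pyRange_one_eq_nil (by omega)]
    simp
  · rw [if_neg hnm]
    by_cases hc : t.contains q0
    · rw [if_pos hc]
      have hmem : q0 ∈ t := by simpa using hc
      have hD' : ¬(q.length = 1 ∧ mg < 0) := by
        rintro ⟨h1, h2⟩
        apply hnD
        refine ⟨h2, h1, ?_⟩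
        intro x hx
        obtain ⟨a, rfl⟩ := List.length_eq_one_iff.mp h1
        have hxa : x = a := by simpa using hx
        have : q0 = a := by rw [hq0def]; simp [PySem.List.pyGet?_zero_cons]
        rw [hxa, ← this]; exact hmem
      obtain ⟨idx, hidx⟩ : ∃ idx, PySem.List.index? t q0 = some idx := by
        have h := PySem.List.index?_isSome_iff (xs := t) (v := q0) |>.mpr hmem
        exact Option.isSome_iff_exists.mp h
      obtain ⟨hklt, hteq, hfirstk⟩ := PySem.List.getElem_of_index?_eq_some hidx
      rw [hidx, Option.getD_some]
      rw [pyOuter_eq_any t q q0 mg hq0def hm hD' (idx : Int) (by positivity)]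
      set bound : Int := (t.length : Int) - q.length + 1 with hbound
      by_cases hib : (idx : Int) ≤ bound
      · rw [PySem.List.pyRange_one_append 0 (idx : Int) bound (by positivity) hib, List.any_append]
        have hz : ((PySem.List.pyRange 0 (idx : Int) 1).any fun p =>
            ((PySem.List.pyGet? t p).getD 0 == q0) && altMatch t (q.drop 1) mg p) = false := by
          rw [List.any_eq_false]
          intro p hp
          have hpb := PySem.List.mem_pyRange_one.mp hp
          have hpn : p.toNat < idx := by omega
          have hne := hfirstk p.toNat hpn
          have hget : (PySem.List.pyGet? t p).getD 0 = t[p.toNat]'(by omega) := by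
            rw [PySem.List.pyGet?_of_nonneg t hpb.1]
            simp [List.getElem?_eq_getElem (show p.toNat < t.length by omega)]
          simp [hget, hne]
        rw [hz, Bool.false_or]
      · rw [PySem.List.pyRange_one_eq_nil (by omega)]
        simp only [List.any_nil]
        symm
        rw [List.any_eq_false]
        intro p hp
        have hpb := PySem.List.mem_pyRange_one.mp hp
        have hplen : p.toNat < t.length := by omega
        have hpn : p.toNat < idx := by omega
        have hne := hfirstk p.toNat hpn
        have hget : (PySem.List.pyGet? t p).getD 0 = t[p.toNat]'hplen := by
          rw [PySem.List.pyGet?_of_nonneg t hpb.1]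
          simp [List.getElem?_eq_getElem hplen]
        simp [hget, hne]
    · rw [if_neg hc]
      have hnmem : q0 ∉ t := by simpa using hc
      symm
      rw [List.any_eq_false]
      intro p hp
      have hpb := PySem.List.mem_pyRange_one.mp hp
      have hplen : p.toNat < t.length := by omega
      have hget : (PySem.List.pyGet? t p).getD 0 = t[p.toNat]'hplen := by
        rw [PySem.List.pyGet?_of_nonneg t hpb.1]
        simp [List.getElem?_eq_getElem hplen]
      have hne : t[p.toNat]'hplen ≠ q0 := fun h => hnmem (h ▸ List.getElem_mem hplen)
      simp [hget, hne]

theorem main_tight (t q : List Int) (mg : Int)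
    (hmg : mg < 0) (hlen : q.length = 1) (hall : ∀ x ∈ q, x ∈ t) :
    find_similar_pattern t q mg = false ∧ find_similar_pattern_alt t q mg = true := by
  obtain ⟨a, rfl⟩ := List.length_eq_one_iff.mp hlen
  have hmem : a ∈ t := hall a (by simp)
  have htl : 1 ≤ t.length := List.length_pos_iff.mpr (by rintro rfl; simp at hmem)
  have hq0 : (PySem.List.pyGet? [a] (0 : Int)).getD 0 = a := by
    rw [PySem.List.pyGet?_zero_cons]; rfl
  constructor
  · simp only [find_similar_pattern]
    rw [hq0, if_neg (by push_cast; omega), if_pos (by simpa using hmem)]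
    exact pyOuter_false_of_neg t [a] a _ _ mg _ hmg _
  · simp only [find_similar_pattern_alt]
    rw [hq0]
    obtain ⟨idx, hidx⟩ : ∃ idx, PySem.List.index? t a = some idx :=
      Option.isSome_iff_exists.mp (PySem.List.index?_isSome_iff (xs := t) (v := a) |>.mpr hmem)
    obtain ⟨hklt, hteq, -⟩ := PySem.List.getElem_of_index?_eq_some hidx
    rw [List.any_eq_true]
    refine ⟨(idx : Int), PySem.List.mem_pyRange_one.mpr ⟨by positivity, by push_cast; omega⟩, ?_⟩
    have hget : (PySem.List.pyGet? t (idx : Int)).getD 0 = t[idx]'hklt := by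
      rw [PySem.List.pyGet?_of_nonneg t (by positivity), Int.toNat_natCast]
      simp [List.getElem?_eq_getElem hklt]
    have hrest : PySem.List.slice [a] (some 1) none = ([] : List Int) := by
      rw [PySem.List.slice_from _ (by norm_num)]
      rfl
    simp [hget, hteq, hrest, altMatch, List.getElem?_eq_getElem hklt]

-- ===== VERDICT (by name: the statement is the Claim_ definition above) =====
theorem find_similar_pattern_spec : Claim_unchanged_find_similar_pattern := by
  intro target_trace querry_trace max_gap _ hpre hnD
  exact main_equiv target_trace querry_trace max_gap hpre hnD

theorem find_similar_pattern_changed : Claim_changed_find_similar_pattern := by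
  unfold Claim_changed_find_similar_pattern
  refine ⟨by decide, by decide, by decide, ?_, ?_, by decide⟩
  · exact (main_tight [1] [1] (-1) (by norm_num) rfl (by simp)).1
  · exact (main_tight [1] [1] (-1) (by norm_num) rfl (by simp)).2

theorem find_similar_pattern_tight : Claim_exact_find_similar_pattern := by
  intro target_trace querry_trace max_gap _ _ hD
  obtain ⟨h1, h2, h3⟩ := hD
  have h := main_tight target_trace querry_trace max_gap h1 h2 h3
  rw [h.1, h.2]
  simp
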